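-- pv_equiv track=rewrite | github.com/fossabot/swak | swak/plugins/reform/mod_reform.py | _tag_suffix
-- ===== SOURCE A (Python) =====
-- def _tag_suffix(tag_parts):
--     cnt = len(tag_parts)
--     if cnt == 0:
--         return []
--     rev_tag_parts = tag_parts[::-1]
--     rev_tag_suffix = [None] * cnt
--     for i in range(1, cnt + 1):
--         rev_tag_suffix[i - 1] = '.'.join([rev_tag_parts[j]
--                                          for j in range(0, i)][::-1])
--     return rev_tag_suffix
-- ===== SOURCE B (Python) =====
-- def _tag_suffix(tag_parts):
--     result = []
--     suffix = None
--     for part in reversed(tag_parts):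
--         suffix = part if suffix is None else part + '.' + suffix
--         result.append(suffix)
--     return result
-- ===== Notes on version B (the rewrite author's own statement) =====
-- stated objective: simpler
-- what changed: Replaces the reverse-slice plus per-i join-of-a-reversed-comprehension with a single pass over reversed(tag_parts) that extends one running suffix string (via an is-None sentinel, so empty parts join correctly) and appends it to the result.
import Mathlib
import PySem

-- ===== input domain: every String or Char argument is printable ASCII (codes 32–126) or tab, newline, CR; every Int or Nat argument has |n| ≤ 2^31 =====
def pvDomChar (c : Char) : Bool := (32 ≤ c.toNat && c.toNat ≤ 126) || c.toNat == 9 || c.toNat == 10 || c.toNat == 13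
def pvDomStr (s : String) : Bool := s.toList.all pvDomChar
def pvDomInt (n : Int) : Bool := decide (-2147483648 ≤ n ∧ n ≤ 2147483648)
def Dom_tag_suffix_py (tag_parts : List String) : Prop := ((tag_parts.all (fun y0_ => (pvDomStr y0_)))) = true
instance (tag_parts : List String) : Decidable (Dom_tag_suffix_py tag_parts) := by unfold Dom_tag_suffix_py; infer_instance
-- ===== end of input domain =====

-- B replaces A's index-slicing comprehensions with a single pass over reversed(tag_parts)
-- keeping a running accumulator string (objective: simpler, one pass, no repeated joins).

-- ===== PORT A =====
def tag_suffix_py (tag_parts : List String) : List String :=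
  let cnt : Nat := tag_parts.length
  if cnt = 0 then []
  else
    let rev_tag_parts := (PySem.List.slice? tag_parts none none (-1)).getD []
    -- the Python loop writes slot i-1 for i = 1 .. cnt in order; ported as a map over that range
    (PySem.List.pyRange 1 ((cnt : Int) + 1) 1).map (fun i =>
      PySem.Str.join "."
        ((PySem.List.slice?
            ((PySem.List.pyRange 0 i 1).map (fun j => PySem.List.pyGetD rev_tag_parts j ""))
            none none (-1)).getD []))

-- ===== PORT B =====
-- the loop body of Source B
def tagStep (acc : List String × Option String) (part : String) : List String × Option String :=
  let suffix : String :=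
    match acc.2 with
    | none => part
    | some suf => part ++ "." ++ suf
  (acc.1 ++ [suffix], some suffix)

def tag_suffix_py_alt (tag_parts : List String) : List String :=
  (tag_parts.reverse.foldl tagStep ([], none)).1

-- ===== PRECONDITION & SPEC =====
def Spec_tag_suffix_py (tag_parts : List String) (out : List String) : Prop := out = tag_suffix_py_alt tag_parts
instance (tag_parts : List String) (out : List String) : Decidable (Spec_tag_suffix_py tag_parts out) := by unfold Spec_tag_suffix_py; infer_instance

-- ===== CLAIM (what is proved, stated in full; the proofs are below) =====
def Claim_equal_tag_suffix_py : Prop := ∀ (tag_parts : List String), Dom_tag_suffix_py tag_parts → Spec_tag_suffix_py tag_parts (tag_suffix_py tag_parts)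

-- ===== LEMMAS AND PROOFS =====

-- string-level join facts, lifted from PySem.Chars
theorem join_single_str (p : String) : PySem.Str.join "." [p] = p := by
  apply String.toList_inj.mp
  simp [PySem.Str.toList_join, PySem.Chars.join_singleton]

theorem join_cons_str (p q : String) (rest : List String) :
    PySem.Str.join "." (p :: q :: rest) = p ++ "." ++ PySem.Str.join "." (q :: rest) := by
  apply String.toList_inj.mp
  simp [PySem.Str.toList_join, String.toList_append, PySem.Chars.join_cons_cons]

theorem join_cons_str' (p : String) (acc : List String) (h : acc ≠ []) :
    PySem.Str.join "." (p :: acc) = p ++ "." ++ PySem.Str.join "." acc := by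
  cases acc with
  | nil => exact absurd rfl h
  | cons q rest => exact join_cons_str p q rest

-- the inner comprehension of A is a take of the reversed list
theorem mapRange_pyGetD_take (xs : List String) (m : Nat) (hm : m ≤ xs.length) :
    (PySem.List.pyRange 0 (m : Int) 1).map (fun j => PySem.List.pyGetD xs j "") = xs.take m := by
  rw [show PySem.List.pyRange 0 (m : Int) 1 = PySem.List.pyRange 0 (m : Int) from rfl,
      PySem.List.pyRange_one]
  simp only [Int.toNat_natCast, List.map_map, Int.sub_zero]
  apply List.ext_getElem
  · simp [hm]
  · intro k hk hk'
    simp only [List.getElem_map, List.getElem_range, Function.comp_apply, List.getElem_take]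
    have hkx : k < xs.length := by
      have := hk'; simp at this; omega
    rw [show ((0 : Int) + (k : Int)) = ((k : Nat) : Int) by omega,
        PySem.List.pyGetD_natCast]
    simp [List.getD, hkx]

-- the chain of extensions Source B builds from state `some s` while folding over r
def pref (s : String) : List String → List String
  | [] => []
  | p :: r => (p ++ "." ++ s) :: pref (p ++ "." ++ s) r

theorem foldB (r : List String) : ∀ (out : List String) (s : String),
    (r.foldl tagStep (out, some s)).1 = out ++ pref s r := by
  induction r with
  | nil => intro out s; simp [pref]
  | cons p r ih =>
      intro out s
      simp only [List.foldl_cons, tagStep, pref, ih]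
      simp

theorem pref_spec (r : List String) : ∀ (acc : List String), acc ≠ [] →
    pref (PySem.Str.join "." acc) r
      = (List.range r.length).map
          (fun k => PySem.Str.join "." ((r.take (k+1)).reverse ++ acc)) := by
  induction r with
  | nil => intro acc _; simp [pref]
  | cons p r ih =>
      intro acc hacc
      have h1 : p ++ "." ++ PySem.Str.join "." acc = PySem.Str.join "." (p :: acc) :=
        (join_cons_str' p acc hacc).symm
      simp only [pref, h1]
      rw [ih (p :: acc) (by simp)]
      simp only [List.length_cons, List.range_succ_eq_map, List.map_cons, List.map_map]
      simp only [List.cons.injEq]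
      refine ⟨by simp, ?_⟩
      · apply List.map_congr_left
        intro k _
        simp [List.take_succ_cons, List.reverse_cons]

-- ===== VERDICT (by name: the statement is the Claim_ definition above) =====
theorem tag_suffix_py_spec : Claim_equal_tag_suffix_py := by
  intro l _
  show tag_suffix_py l = tag_suffix_py_alt l
  cases hrev : l.reverse with
  | nil =>
      have : l = [] := by simpa using congrArg List.reverse hrev
      subst this
      rfl
  | cons p r =>
      have hlen : l.length = r.length + 1 := by
        have := congrArg List.length hrev; simpa using this
      -- B side
      have hB : tag_suffix_py_alt l = p :: pref p r := by
        unfold tag_suffix_py_alt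
        rw [hrev]
        simp only [List.foldl_cons, tagStep]
        rw [show (([] : List String) ++ [p], some p) = ([p], some p) by simp]
        rw [foldB r [p] p]
        rfl
      -- A side
      have hA : tag_suffix_py l
          = (List.range (r.length + 1)).map
              (fun k => PySem.Str.join "." (((p :: r).take (k+1)).reverse)) := by
        unfold tag_suffix_py
        simp only [hlen, PySem.List.slice?_none_none_neg_one, Option.getD_some, hrev]
        rw [if_neg (by omega)]
        rw [PySem.List.pyRange_one]
        rw [show ((↑(r.length + 1) : Int) + 1 - 1).toNat = r.length + 1 by omega]
        rw [List.map_map]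
        apply List.map_congr_left
        intro k hk
        simp only [Function.comp_apply]
        rw [show (1 : Int) + (k : Int) = ((k + 1 : Nat) : Int) by push_cast; ring]
        rw [mapRange_pyGetD_take (p :: r) (k + 1)
            (by simp only [List.mem_range] at hk; simp; omega)]
      rw [hA, hB]
      rw [show pref p r = pref (PySem.Str.join "." [p]) r by rw [join_single_str]]
      rw [pref_spec r [p] (by simp)]
      rw [List.range_succ_eq_map, List.map_cons, List.map_map]
      congr 1
      · simp [join_single_str]
      · apply List.map_congr_left
        intro k _
        simp [List.take_succ_cons, List.reverse_cons]
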